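-- pv_equiv track=rewrite | github.com/fjjyyzfz/CS-519-Algorithm | hw4/nbest.py | nbesta
-- ===== SOURCE A (Python) =====
-- def nbesta(a, b):
-- 	AB = {}
-- 	for i in a:
-- 		for j in b:
-- 			AB.setdefault(i + j, []).append((i, j))
-- 	keys = sorted(AB.keys())
-- 	pairs = [AB[key] for key in keys]
-- 	i = 0
-- 	k = 0
-- 	result = []
-- 	while(i < len(a)):
-- 		if len(pairs[k]) == 1:
-- 			result.append(pairs[k][0])
-- 			i += 1
-- 			k += 1
-- 		else:
-- 			sortedPairs = sorted(pairs[k], key = lambda x:x[1])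
-- 			j = 0
-- 			while(i < len(a)) and (j < len(sortedPairs)):
-- 				result.append(sortedPairs[j])
-- 				i += 1
-- 				j += 1
-- 			k += 1
-- 	return result
-- ===== SOURCE B (Python) =====
-- def nbesta(a, b):
-- 	pairs = [(i, j) for i in a for j in b]
-- 	pairs.sort(key=lambda p: (p[0] + p[1], p[1]))
-- 	return pairs[:len(a)]
-- ===== Notes on version B (the rewrite author's own statement) =====
-- stated objective: simpler
-- what changed: Replaces A's dict-of-sum-groups plus sorted keys plus per-group sort and a hand-written two-level while loop by one flat product list sorted once with the tuple key (sum, j) and sliced to len(a).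
import Mathlib
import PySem

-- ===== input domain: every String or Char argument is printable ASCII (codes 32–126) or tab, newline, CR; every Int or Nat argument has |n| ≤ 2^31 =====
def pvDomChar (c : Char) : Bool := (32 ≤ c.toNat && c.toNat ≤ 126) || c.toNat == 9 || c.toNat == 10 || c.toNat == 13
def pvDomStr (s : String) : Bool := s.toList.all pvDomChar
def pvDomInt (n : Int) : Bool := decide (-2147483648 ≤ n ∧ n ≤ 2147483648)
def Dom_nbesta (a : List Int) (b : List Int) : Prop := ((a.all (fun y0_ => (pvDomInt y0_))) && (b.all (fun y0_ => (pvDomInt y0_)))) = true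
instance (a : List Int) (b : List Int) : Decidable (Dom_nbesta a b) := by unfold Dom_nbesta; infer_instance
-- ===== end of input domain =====

-- B replaces A's dict-of-sum-groups + sorted keys + per-group sort + two-level while loop
-- by one flat product list sorted once with the tuple key (sum, j) and sliced to len(a) (objective: simpler).

-- ===== PORT A =====
-- inner while loop: while (i < len(a)) and (j < len(sortedPairs)): result.append(sortedPairs[j]); i += 1; j += 1
-- returns (elements appended, how many); rem is the remaining budget len(a) - i
def nbestaInner : Nat → List (Int × Int) → List (Int × Int) × Nat
  | 0, _ => ([], 0)
  | _ + 1, [] => ([], 0)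
  | r + 1, x :: xs =>
      let (l, c) := nbestaInner r xs
      (x :: l, c + 1)

-- outer while loop: while (i < len(a)): look at pairs[k] …  (rem = len(a) - i; the list argument is pairs[k:])
def nbestaLoop : Nat → List (List (Int × Int)) → List (Int × Int)
  | 0, _ => []
  | _ + 1, [] => []        -- Python raises IndexError here (pairs[k] out of range); excluded by Pre_
  | r + 1, g :: rest =>
      if g.length = 1 then
        match PySem.List.pyGet? g 0 with   -- pairs[k][0]
        | some x => x :: nbestaLoop r rest
        | none => []
      else
        let sortedPairs := PySem.List.sorted g (fun x => x.2)
        let (l, c) := nbestaInner (r + 1) sortedPairs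
        l ++ nbestaLoop (r + 1 - c) rest

def nbesta (a : List Int) (b : List Int) : List (Int × Int) :=
  let AB := a.foldl (fun d i => b.foldl
      (fun d j => PySem.Dict.modify d (i + j) [] (fun v => v ++ [(i, j)])) d)
    (PySem.Dict.empty : PySem.Dict Int (List (Int × Int)))
  let keys := PySem.List.sorted (PySem.Dict.keys AB) (fun x => x)
  let pairs := keys.map (fun k => PySem.Dict.getD AB k [])
  nbestaLoop a.length pairs

-- ===== PORT B =====
def nbesta_alt (a : List Int) (b : List Int) : List (Int × Int) :=
  let pairs := a.flatMap (fun i => b.map (fun j => (i, j)))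
  let spairs := PySem.List.sorted2 pairs (fun p => p.1 + p.2) (fun p => p.2)
  spairs.take a.length

-- ===== PRECONDITION & SPEC =====
-- A raises IndexError iff a is non-empty and b is empty (then pairs = [] but the while loop reads pairs[0]).
def Pre_nbesta (a : List Int) (b : List Int) : Prop := a = [] ∨ b ≠ []
instance (a : List Int) (b : List Int) : Decidable (Pre_nbesta a b) := by unfold Pre_nbesta; infer_instance
def pvWitness_nbesta : List Int × List Int := ([1, 2], [0])

def Spec_nbesta (a : List Int) (b : List Int) (out : List (Int × Int)) : Prop := out = nbesta_alt a b
instance (a : List Int) (b : List Int) (out : List (Int × Int)) : Decidable (Spec_nbesta a b out) := by unfold Spec_nbesta; infer_instance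

-- ===== CLAIM (what is proved, stated in full; the proofs are below) =====
def Claim_equal_nbesta : Prop := ∀ (a : List Int) (b : List Int), Dom_nbesta a b → Pre_nbesta a b → Spec_nbesta a b (nbesta a b)

-- ===== LEMMAS AND PROOFS =====

-- the tuple key (p[0] + p[1], p[1]) as a lexicographically ordered value
def keyLex (p : Int × Int) : Int ×ₗ Int := toLex (p.1 + p.2, p.2)

theorem keyLex_injective : Function.Injective keyLex := by
  intro p q h
  simp only [keyLex] at h
  have h' : (p.1 + p.2, p.2) = (q.1 + q.2, q.2) := toLex.injective h
  rw [Prod.mk.injEq] at h'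
  obtain ⟨ha, hb⟩ := h'
  exact Prod.ext (by omega) hb

-- the inner while loop takes min(rem, len) elements and reports how many it took
theorem nbestaInner_spec (r : Nat) (xs : List (Int × Int)) :
    nbestaInner r xs = (xs.take r, min r xs.length) := by
  induction r generalizing xs with
  | zero => simp [nbestaInner]
  | succ r ih =>
    cases xs with
    | nil => simp [nbestaInner]
    | cons x t => simp [nbestaInner, ih, List.take_succ_cons]

-- the outer while loop is 'take r' of the concatenation of the per-group sorted lists
theorem nbestaLoop_take (gs : List (List (Int × Int))) (r : Nat)
    (h : r ≤ (gs.map List.length).sum) :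
    nbestaLoop r gs =
      ((gs.map (fun g => PySem.List.sorted g (fun x => x.2))).flatten).take r := by
  induction gs generalizing r with
  | nil =>
    simp at h
    subst h
    simp [nbestaLoop]
  | cons g rest ih =>
    cases r with
    | zero => simp [nbestaLoop]
    | succ r =>
      simp only [nbestaLoop]
      by_cases h1 : g.length = 1
      · obtain ⟨x, hx⟩ := List.length_eq_one_iff.mp h1
        subst hx
        have hget : PySem.List.pyGet? [x] (0 : Int) = some x := rfl
        rw [if_pos h1, hget]
        have hs : PySem.List.sorted [x] (fun p : Int × Int => p.2) = [x] := rfl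
        simp only [List.map_cons, List.flatten_cons, hs]
        simp only [List.singleton_append, List.take_succ_cons]
        rw [ih r (by simp at h; omega)]
      · rw [if_neg h1]
        rw [nbestaInner_spec]
        have hlen : (PySem.List.sorted g (fun x : Int × Int => x.2)).length = g.length :=
          PySem.List.length_sorted g _ _
        have hsub : r + 1 - min (r + 1) (PySem.List.sorted g (fun x : Int × Int => x.2)).length
            = r + 1 - g.length := by omega
        rw [hsub, ih (r + 1 - g.length) (by simp at h ⊢; omega)]
        simp only [List.map_cons, List.flatten_cons]
        rw [List.take_append, hlen]

-- B's single sort with the tuple key is the sort under keyLex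
theorem sorted2_lex (xs : List (Int × Int)) :
    PySem.List.sorted2 xs (fun p => p.1 + p.2) (fun p => p.2) =
      PySem.List.sorted xs keyLex := by
  show List.foldl _ [] xs = List.foldl _ [] xs
  have hb : (fun a b : Int × Int =>
        decide (a.1 + a.2 < b.1 + b.2) || (!decide (b.1 + b.2 < a.1 + a.2) && decide (a.2 < b.2)))
      = (fun a b : Int × Int => decide (keyLex a < keyLex b)) := by
    funext x y
    rcases lt_trichotomy (x.1 + x.2) (y.1 + y.2) with h | h | h
    · simp [keyLex, Prod.Lex.toLex_lt_toLex, h, not_lt.mpr (le_of_lt h)]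
    · simp [keyLex, Prod.Lex.toLex_lt_toLex, h]
    · simp [keyLex, Prod.Lex.toLex_lt_toLex, not_lt.mpr (le_of_lt h), h, ne_of_gt h]
  rw [hb]

theorem flatten_map_perm (S : List Int) (f g : Int → List (Int × Int))
    (h : ∀ s ∈ S, (f s).Perm (g s)) :
    ((S.map f).flatten).Perm ((S.map g).flatten) := by
  induction S with
  | nil => simp
  | cons s S ih =>
    simp only [List.map_cons, List.flatten_cons]
    exact (h s (by simp)).append (ih (fun t ht => h t (by simp [ht])))

-- concatenating the sum-groups over any duplicate-free list of exactly the occurring sums permutes L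
theorem groups_perm : ∀ (S : List Int) (L : List (Int × Int)), S.Nodup →
    (∀ s, s ∈ S ↔ s ∈ L.map (fun p => p.1 + p.2)) →
    ((S.map (fun s => L.filter (fun p => p.1 + p.2 == s))).flatten).Perm L
  | [], L, _, hmem => by
    have hL : L = [] := by
      cases L with
      | nil => rfl
      | cons p t => exact absurd ((hmem (p.1 + p.2)).mpr (by simp)) (by simp)
    simp [hL]
  | s :: S', L, hnd, hmem => by
    have hfilt : ∀ t ∈ S', L.filter (fun p => p.1 + p.2 == t)
        = (L.filter (fun p => !(p.1 + p.2 == s))).filter (fun p => p.1 + p.2 == t) := by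
      intro t ht
      have hts : t ≠ s := fun he => ((List.nodup_cons.mp hnd).1 (he ▸ ht))
      rw [List.filter_filter]
      apply List.filter_congr
      intro p _
      by_cases hp : p.1 + p.2 = t
      · simp [hp, hts]
      · simp [hp]
    have hmem' : ∀ t, t ∈ S' ↔ t ∈ (L.filter (fun p => !(p.1 + p.2 == s))).map (fun p => p.1 + p.2) := by
      intro t
      constructor
      · intro ht
        have hts : t ≠ s := fun he => ((List.nodup_cons.mp hnd).1 (he ▸ ht))
        obtain ⟨p, hpL, hpt⟩ := List.mem_map.mp ((hmem t).mp (by simp [ht]))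
        exact List.mem_map.mpr ⟨p, List.mem_filter.mpr ⟨hpL, by simp [hpt, hts]⟩, hpt⟩
      · intro ht
        obtain ⟨p, hpL, hpt⟩ := List.mem_map.mp ht
        have h1 := List.mem_filter.mp hpL
        have hts : t ≠ s := by
          have := h1.2
          simp at this
          omega
        have : t ∈ s :: S' := (hmem t).mpr (List.mem_map.mpr ⟨p, h1.1, hpt⟩)
        simpa [hts] using this
    have IH := groups_perm S' (L.filter (fun p => !(p.1 + p.2 == s)))
      (List.nodup_cons.mp hnd).2 hmem'
    simp only [List.map_cons, List.flatten_cons]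
    rw [List.map_congr_left hfilt]
    exact (List.Perm.append_left _ IH).trans (List.filter_append_perm _ L)

theorem nbesta_main (a b : List Int) (hpre : a = [] ∨ b ≠ []) : nbesta a b = nbesta_alt a b := by
  classical
  set L := a.flatMap (fun i => b.map (fun j => (i, j))) with hLdef
  set K := a.flatMap (fun i => b.map (fun j => ((i + j), (i, j)))) with hKdef
  have hK : K = L.map (fun p => (p.1 + p.2, p)) := by
    rw [hKdef, hLdef]
    simp [List.map_flatMap, List.map_map, Function.comp_def]
  set AB := a.foldl (fun d i => b.foldl
      (fun d j => PySem.Dict.modify d (i + j) [] (fun v => v ++ [(i, j)])) d)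
    (PySem.Dict.empty : PySem.Dict Int (List (Int × Int))) with hABdef
  have hAB : AB = K.foldl (fun d p => PySem.Dict.modify d p.1 [] (fun v => v ++ [p.2]))
      (PySem.Dict.empty : PySem.Dict Int (List (Int × Int))) := by
    rw [hABdef, hKdef, List.foldl_flatMap]
    simp [List.foldl_map]
  set F := fun s => L.filter (fun p => p.1 + p.2 == s) with hFdef
  have hGet : ∀ s, PySem.Dict.getD AB s [] = F s := by
    intro s
    rw [hAB, PySem.Dict.getD_foldl_modify_append, hK, List.filter_map]
    simp [List.map_map, Function.comp_def, hFdef]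
  have hkeys : AB.keys = PySem.Set.ofList (L.map (fun p => p.1 + p.2)) := by
    rw [hAB, PySem.Dict.keys_foldl_modify_key K Prod.fst [] (fun _ p v => v ++ [p.2])]
    rw [hK]
    simp [List.map_map, Function.comp_def, PySem.Dict.keys_empty]
    rfl
  have hnodup : AB.keys.Nodup := by
    rw [hAB]
    exact PySem.Dict.nodup_keys_foldl_modify_key K Prod.fst [] (fun _ p v => v ++ [p.2]) _
      (by simp)
  set skeys := PySem.List.sorted AB.keys (fun x => x) with hskdef
  have hnds : skeys.Nodup := ((PySem.List.sorted_perm AB.keys (fun x => x) false).nodup_iff).mpr hnodup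
  have hmemk : ∀ s, s ∈ skeys ↔ s ∈ L.map (fun p => p.1 + p.2) := by
    intro s
    rw [hskdef, PySem.List.mem_sorted, hkeys, PySem.Set.mem_ofList]
  have hperm : ((skeys.map F).flatten).Perm L := groups_perm skeys L hnds hmemk
  have hsum : ((skeys.map F).map List.length).sum = L.length := by
    rw [← List.length_flatten]; exact hperm.length_eq
  have hLlen : L.length = a.length * b.length := by
    rw [hLdef]
    simp [List.length_flatMap]
  have hn : a.length ≤ L.length := by
    rcases hpre with h | h
    · simp [h]
    · have hb : 0 < b.length := List.length_pos_iff.mpr h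
      rw [hLlen]
      exact Nat.le_mul_of_pos_right _ hb
  have hsumF : ∀ s x, x ∈ F s → x.1 + x.2 = s := by
    intro s x hx
    have := (List.mem_filter.mp hx).2
    simpa using this
  have hlt : skeys.Pairwise (· < ·) := by
    have h1 : skeys.Pairwise (· ≤ ·) := by
      have := PySem.List.sorted_pairwise AB.keys (fun x => x)
      simpa [hskdef] using this
    exact (h1.and hnds).imp (fun h => lt_of_le_of_ne h.1 h.2)
  -- the flattened per-group sorted lists equal the globally sorted list
  have hmain : ((skeys.map (fun s => PySem.List.sorted (F s) (fun x => x.2))).flatten)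
      = PySem.List.sorted L keyLex := by
    apply PySem.List.eq_of_perm_of_pairwise_le_of_injective keyLex keyLex_injective
    · have h1 : ((skeys.map (fun s => PySem.List.sorted (F s) (fun x => x.2))).flatten).Perm
          ((skeys.map F).flatten) :=
        flatten_map_perm skeys _ F (fun s _ => PySem.List.sorted_perm (F s) _ false)
      exact (h1.trans hperm).trans (PySem.List.sorted_perm L keyLex false).symm
    · rw [List.pairwise_flatten]
      constructor
      · intro l hl
        obtain ⟨s, _, rfl⟩ := List.mem_map.mp hl
        have h2 : (PySem.List.sorted (F s) (fun x => x.2)).Pairwise (fun x y => x.2 ≤ y.2) :=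
          PySem.List.sorted_pairwise (F s) (fun x => x.2)
        refine h2.imp_of_mem ?_
        intro x y hx hy hxy
        have hxs := hsumF s x ((PySem.List.mem_sorted _ _ _ _).mp hx)
        have hys := hsumF s y ((PySem.List.mem_sorted _ _ _ _).mp hy)
        exact Prod.Lex.toLex_le_toLex.mpr (Or.inr ⟨by rw [hxs, hys], hxy⟩)
      · rw [List.pairwise_map]
        refine hlt.imp_of_mem ?_
        intro s t _ _ hst x hx y hy
        have hxs := hsumF s x ((PySem.List.mem_sorted _ _ _ _).mp hx)
        have hyt := hsumF t y ((PySem.List.mem_sorted _ _ _ _).mp hy)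
        exact Prod.Lex.toLex_le_toLex.mpr (Or.inl (by rw [hxs, hyt]; exact hst))
    · exact PySem.List.sorted_pairwise L keyLex
  show nbestaLoop a.length (skeys.map (fun k => PySem.Dict.getD AB k []))
      = (PySem.List.sorted2 L (fun p => p.1 + p.2) (fun p => p.2)).take a.length
  rw [sorted2_lex]
  have hmapF : (fun k => PySem.Dict.getD AB k []) = F := funext hGet
  rw [hmapF]
  rw [nbestaLoop_take (skeys.map F) a.length (by rw [hsum]; exact hn)]
  rw [List.map_map]
  rw [← hmain]
  rfl

-- ===== VERDICT (by name: the statement is the Claim_ definition above) =====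
theorem nbesta_spec : Claim_equal_nbesta := by
  intro a b _ hpre
  exact nbesta_main a b hpre
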